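-- pv_equiv track=rewrite | github.com/paiml/depyler | examples/hard_numeric_simpson.py | simpson_quadratic
-- ===== SOURCE A (Python) =====
-- def eval_quadratic(a: int, b: int, c: int, x: int) -> int:
--     """Evaluate a*x^2 + b*x + c."""
--     return a * x * x + b * x + c
--
-- def simpson_quadratic(a: int, b: int, c: int, x0: int, x1: int, n: int) -> int:
--     """Simpson's 1/3 rule for a*x^2+b*x+c. n must be even.
--     Returns approximate integral * 3 (to avoid division by 3)."""
--     if n <= 0 or n % 2 != 0:
--         return 0
--     h: int = (x1 - x0) // n
--     if h == 0:
--         return 0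
--     total: int = eval_quadratic(a, b, c, x0) + eval_quadratic(a, b, c, x1)
--     i: int = 1
--     while i < n:
--         xi: int = x0 + i * h
--         fv: int = eval_quadratic(a, b, c, xi)
--         if i % 2 == 0:
--             total = total + 2 * fv
--         else:
--             total = total + 4 * fv
--         i = i + 1
--     return total * h
-- ===== SOURCE B (Python) =====
-- def simpson_quadratic(a: int, b: int, c: int, x0: int, x1: int, n: int) -> int:
--     """Closed-form Simpson sum for a quadratic: O(1) via arithmetic-series sums."""
--     if n <= 0 or n % 2 != 0:
--         return 0
--     h = (x1 - x0) // n
--     if h == 0: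
--         return 0
--     m = n // 2
--     f0 = a * x0 * x0 + b * x0 + c
--     f1 = a * x1 * x1 + b * x1 + c
--     p = (2 * a * x0 + b) * h
--     q = a * h * h
--     total = f0 + f1 + (6 * m - 2) * f0 + p * 2 * m * (3 * m - 1) + q * 4 * m * m * (2 * m - 1)
--     return total * h
-- ===== Notes on version B (the rewrite author's own statement) =====
-- stated objective: faster
-- what changed: Replaces A's O(n) weighted while-loop over sample points by an O(1) closed form obtained from arithmetic-series sums of i and i^2 over the odd- and even-index subsets.
import Mathlib
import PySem

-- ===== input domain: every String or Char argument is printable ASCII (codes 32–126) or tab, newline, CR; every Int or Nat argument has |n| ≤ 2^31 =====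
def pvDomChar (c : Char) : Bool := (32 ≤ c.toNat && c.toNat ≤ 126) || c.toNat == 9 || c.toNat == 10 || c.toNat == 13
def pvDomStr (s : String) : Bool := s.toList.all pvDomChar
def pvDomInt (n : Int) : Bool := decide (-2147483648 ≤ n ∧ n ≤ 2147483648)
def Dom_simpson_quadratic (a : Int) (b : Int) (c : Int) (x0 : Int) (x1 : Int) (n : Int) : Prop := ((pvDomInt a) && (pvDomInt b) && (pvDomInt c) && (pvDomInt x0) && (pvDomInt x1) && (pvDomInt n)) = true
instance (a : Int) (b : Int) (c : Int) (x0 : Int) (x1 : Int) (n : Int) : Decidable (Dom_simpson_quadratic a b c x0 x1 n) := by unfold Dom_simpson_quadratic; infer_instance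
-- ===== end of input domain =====

-- B replaces A's O(n) weighted loop by a closed form built from arithmetic-series sums (objective: faster, asymptotic).

-- ===== PORT A =====
def eval_quadratic (a : Int) (b : Int) (c : Int) (x : Int) : Int := a * x * x + b * x + c

def simpson_quadratic (a : Int) (b : Int) (c : Int) (x0 : Int) (x1 : Int) (n : Int) : Int :=
  if n ≤ 0 ∨ PySem.Int.mod n 2 ≠ 0 then 0
  else
    let h := PySem.Int.floordiv (x1 - x0) n
    if h = 0 then 0
    else
      let total := eval_quadratic a b c x0 + eval_quadratic a b c x1
      -- 'while i < n: …; i += 1' starting at i = 1, transliterated as a fold over [1, n)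
      let total := (PySem.List.pyRange 1 n 1).foldl
        (fun t i =>
          let xi := x0 + i * h
          let fv := eval_quadratic a b c xi
          if PySem.Int.mod i 2 = 0 then t + 2 * fv else t + 4 * fv) total
      total * h

-- ===== PORT B =====
def simpson_quadratic_alt (a : Int) (b : Int) (c : Int) (x0 : Int) (x1 : Int) (n : Int) : Int :=
  if n ≤ 0 ∨ PySem.Int.mod n 2 ≠ 0 then 0
  else
    let h := PySem.Int.floordiv (x1 - x0) n
    if h = 0 then 0
    else
      let m := PySem.Int.floordiv n 2
      let f0 := a * x0 * x0 + b * x0 + c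
      let f1 := a * x1 * x1 + b * x1 + c
      let p := (2 * a * x0 + b) * h
      let q := a * h * h
      let total := f0 + f1 + (6 * m - 2) * f0 + p * 2 * m * (3 * m - 1) + q * 4 * m * m * (2 * m - 1)
      total * h

-- ===== PRECONDITION & SPEC =====
def Spec_simpson_quadratic (a : Int) (b : Int) (c : Int) (x0 : Int) (x1 : Int) (n : Int) (out : Int) : Prop := out = simpson_quadratic_alt a b c x0 x1 n
instance (a : Int) (b : Int) (c : Int) (x0 : Int) (x1 : Int) (n : Int) (out : Int) : Decidable (Spec_simpson_quadratic a b c x0 x1 n out) := by unfold Spec_simpson_quadratic; infer_instance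

-- ===== CLAIM (what is proved, stated in full; the proofs are below) =====
def Claim_equal_simpson_quadratic : Prop := ∀ (a : Int) (b : Int) (c : Int) (x0 : Int) (x1 : Int) (n : Int), Dom_simpson_quadratic a b c x0 x1 n → Spec_simpson_quadratic a b c x0 x1 n (simpson_quadratic a b c x0 x1 n)

-- ===== LEMMAS AND PROOFS =====

-- A's loop body as a named step function
def pvStep (a b c x0 h : Int) (t i : Int) : Int :=
  let xi := x0 + i * h
  let fv := eval_quadratic a b c xi
  if PySem.Int.mod i 2 = 0 then t + 2 * fv else t + 4 * fv

-- the loop over [1, 2m) has the closed form used by B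
lemma pvLoop_closed (a b c x0 h : Int) (m : Nat) (hm : 1 ≤ m) (t : Int) :
    (PySem.List.pyRange 1 (2 * (m : Int)) 1).foldl (pvStep a b c x0 h) t
      = t + (6 * (m : Int) - 2) * (a * x0 * x0 + b * x0 + c)
          + ((2 * a * x0 + b) * h) * 2 * m * (3 * m - 1)
          + (a * h * h) * 4 * m * m * (2 * m - 1) := by
  induction m with
  | zero => omega
  | succ k ih =>
    by_cases hk : 1 ≤ k
    · have e : ((k + 1 : Nat) : Int) = (k : Int) + 1 := by push_cast; ring
      rw [e,
          show (2 * ((k : Int) + 1)) = (2 * (k : Int) + 1) + 1 by ring,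
          PySem.List.pyRange_one_succ_right (show (1:Int) ≤ 2 * (k : Int) + 1 by omega),
          PySem.List.pyRange_one_succ_right (show (1:Int) ≤ 2 * (k : Int) by omega),
          List.foldl_append, List.foldl_append, ih hk]
      simp [pvStep, eval_quadratic]
      ring
    · have hk0 : k = 0 := by omega
      subst hk0
      have e : ((0 + 1 : Nat) : Int) = 1 := by norm_num
      rw [e, show (2 * (1 : Int)) = 1 + 1 by norm_num,
          PySem.List.pyRange_one_singleton]
      simp [pvStep, eval_quadratic]
      ring

-- ===== VERDICT (by name: the statement is the Claim_ definition above) =====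
theorem simpson_quadratic_spec : Claim_equal_simpson_quadratic := by
  intro a b c x0 x1 n _
  unfold Spec_simpson_quadratic simpson_quadratic simpson_quadratic_alt
  by_cases hguard : n ≤ 0 ∨ PySem.Int.mod n 2 ≠ 0
  · rw [if_pos hguard, if_pos hguard]
  · rw [if_neg hguard, if_neg hguard]
    push Not at hguard
    obtain ⟨hn, hmod⟩ := hguard
    have hdvd : (2 : Int) ∣ n := (PySem.Int.mod_eq_zero_iff_dvd n 2).mp hmod
    set h := PySem.Int.floordiv (x1 - x0) n with hh
    by_cases hz : h = 0
    · rw [if_pos hz, if_pos hz]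
    · rw [if_neg hz, if_neg hz]
      obtain ⟨m', hm'⟩ := hdvd
      have hm'pos : 0 < m' := by omega
      have hmdef : PySem.Int.floordiv n 2 = m' := by
        rw [PySem.Int.floordiv_eq_ediv_of_pos (by norm_num : (0:Int) < 2)]; omega
      set mN : Nat := m'.toNat with hmN
      have hcast : (mN : Int) = m' := Int.toNat_of_nonneg (by omega)
      have hrange : PySem.List.pyRange 1 n 1 = PySem.List.pyRange 1 (2 * (mN : Int)) 1 := by
        rw [hcast, show n = 2 * m' from by omega]
      show ((PySem.List.pyRange 1 n 1).foldl (pvStep a b c x0 h)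
        (eval_quadratic a b c x0 + eval_quadratic a b c x1)) * h = _
      rw [hrange,
          pvLoop_closed a b c x0 h mN (by omega)
            (eval_quadratic a b c x0 + eval_quadratic a b c x1),
          hmdef, hcast]
      unfold eval_quadratic
      ring
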